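-- pv_equiv track=rewrite | github.com/EDA-Teaching-RJH/assignment-foundations-of-programming-eeh10 | fleet_manager.py | calculate_payroll
-- ===== SOURCE A (Python) =====
-- def calculate_payroll(ranks):
--     total = 0
--
--     for r in ranks:
--         if r == "Captain":
--             total += 1000
--         elif r == "Commander":
--             total += 800
--         elif r == "Lt. Commander":
--             total += 600
--         elif r == "Lieutenant":
--             total += 400
--         elif r == "Ensign":
--             total += 200
--
--     return total
-- ===== SOURCE B (Python) =====
-- SALARIES = {
--     "Captain": 1000,
--     "Commander": 800,
--     "Lt. Commander": 600,
--     "Lieutenant": 400,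
--     "Ensign": 200,
-- }
--
--
-- def calculate_payroll(ranks):
--     counts = {}
--     for r in ranks:
--         counts[r] = counts.get(r, 0) + 1
--     return sum(c * SALARIES.get(r, 0) for r, c in counts.items())
-- ===== Notes on version B (the rewrite author's own statement) =====
-- stated objective: alternative
-- what changed: B aggregates first: it builds a rank->count frequency table in one pass, then sums count * salary over the distinct ranks via a salary table, instead of A's per-element if/elif accumulation.
import Mathlib
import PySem

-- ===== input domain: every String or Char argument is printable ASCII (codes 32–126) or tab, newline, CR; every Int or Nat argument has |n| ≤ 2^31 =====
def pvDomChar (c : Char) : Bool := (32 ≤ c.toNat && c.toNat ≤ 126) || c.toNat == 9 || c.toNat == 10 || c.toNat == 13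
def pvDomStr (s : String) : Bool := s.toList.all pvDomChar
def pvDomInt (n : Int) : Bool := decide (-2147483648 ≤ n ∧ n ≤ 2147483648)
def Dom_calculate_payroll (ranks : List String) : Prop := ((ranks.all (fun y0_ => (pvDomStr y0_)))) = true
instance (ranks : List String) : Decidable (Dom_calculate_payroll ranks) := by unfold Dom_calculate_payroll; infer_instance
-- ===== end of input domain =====

-- B aggregates first (frequency table, then count*salary over distinct ranks) instead of A's per-element if/elif accumulation; alternative decomposition, same cost.

-- ===== PORT A =====
def calculate_payroll (ranks : List String) : Int :=
  ranks.foldl (fun total r =>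
    if r = "Captain" then total + 1000
    else if r = "Commander" then total + 800
    else if r = "Lt. Commander" then total + 600
    else if r = "Lieutenant" then total + 400
    else if r = "Ensign" then total + 200
    else total) 0

-- ===== PORT B =====
def pvSALARIES : PySem.Dict String Int :=
  PySem.Dict.ofList [("Captain", 1000), ("Commander", 800), ("Lt. Commander", 600),
                     ("Lieutenant", 400), ("Ensign", 200)]

def calculate_payroll_alt (ranks : List String) : Int :=
  ((ranks.foldl (fun d r => d.insert r (d.getD r 0 + 1)) PySem.Dict.empty).items.map
    (fun p => p.2 * pvSALARIES.getD p.1 0)).sum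

-- ===== PRECONDITION & SPEC =====
def Spec_calculate_payroll (ranks : List String) (out : Int) : Prop := out = calculate_payroll_alt ranks
instance (ranks : List String) (out : Int) : Decidable (Spec_calculate_payroll ranks out) := by unfold Spec_calculate_payroll; infer_instance

-- ===== CLAIM (what is proved, stated in full; the proofs are below) =====
def Claim_equal_calculate_payroll : Prop := ∀ (ranks : List String), Dom_calculate_payroll ranks → Spec_calculate_payroll ranks (calculate_payroll ranks)

-- ===== LEMMAS AND PROOFS =====

-- the per-rank salary A's if/elif chain pays equals B's salary-table lookup
theorem pv_sal_eq (r : String) :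
    pvSALARIES.getD r 0 =
      (if r = "Captain" then (1000 : Int)
       else if r = "Commander" then 800
       else if r = "Lt. Commander" then 600
       else if r = "Lieutenant" then 400
       else if r = "Ensign" then 200
       else 0) := by
  have hit : pvSALARIES.items =
      [("Captain", (1000 : Int)), ("Commander", 800), ("Lt. Commander", 600),
       ("Lieutenant", 400), ("Ensign", 200)] := by decide
  simp only [PySem.Dict.getD, PySem.Dict.get?, hit]
  split_ifs with h1 h2 h3 h4 h5 <;>
    first
      | (subst ‹_›; decide)
      | (simp only [List.find?]
         rw [beq_eq_false_iff_ne.mpr (fun h => h1 h.symm),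
             beq_eq_false_iff_ne.mpr (fun h => h2 h.symm),
             beq_eq_false_iff_ne.mpr (fun h => h3 h.symm),
             beq_eq_false_iff_ne.mpr (fun h => h4 h.symm),
             beq_eq_false_iff_ne.mpr (fun h => h5 h.symm)]
         rfl)

-- summing count k * f k over the distinct elements equals summing f over the list
theorem pv_sum_count_mul (l : List String) (f : String → Int) :
    ((PySem.Set.ofList l).map (fun k => (l.count k : Int) * f k)).sum = (l.map f).sum := by
  have hnd := PySem.Set.nodup_ofList (xs := l)
  have hfin : (PySem.Set.ofList l).toFinset = l.toFinset := by
    ext x; simp [PySem.Set.mem_ofList]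
  calc ((PySem.Set.ofList l).map (fun k => (l.count k : Int) * f k)).sum
      = (PySem.Set.ofList l).toFinset.sum (fun k => (l.count k : Int) * f k) :=
        (List.sum_toFinset _ hnd).symm
    _ = ∑ m ∈ l.toFinset, l.count m • f m := by
        rw [hfin]
        exact Finset.sum_congr rfl (fun m _ => by push_cast [nsmul_eq_mul]; ring)
    _ = (l.map f).sum := (Finset.sum_list_map_count l f).symm

-- ===== VERDICT (by name: the statement is the Claim_ definition above) =====
theorem calculate_payroll_spec : Claim_equal_calculate_payroll := by
  intro ranks _
  unfold Spec_calculate_payroll calculate_payroll calculate_payroll_alt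
  rw [PySem.Dict.foldl_insert_getD_add_one_eq_counter, PySem.Dict.items_counter,
      List.map_map]
  have hcomp : (fun p : String × Int => p.2 * pvSALARIES.getD p.1 0) ∘
      (fun k => (k, (ranks.count k : Int))) =
      fun k => (ranks.count k : Int) * pvSALARIES.getD k 0 := rfl
  rw [hcomp, pv_sum_count_mul]
  have hA : ranks.foldl (fun total r =>
      if r = "Captain" then total + 1000
      else if r = "Commander" then total + 800
      else if r = "Lt. Commander" then total + 600
      else if r = "Lieutenant" then total + 400
      else if r = "Ensign" then total + 200
      else total) 0 =
      ranks.foldl (fun acc r => acc + pvSALARIES.getD r 0) 0 := by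
    apply PySem.List.foldl_congr_mem
    intro acc r _
    rw [pv_sal_eq r]
    split_ifs <;> ring
  rw [hA, PySem.List.foldl_add, zero_add]
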